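-- pv_equiv track=rewrite | github.com/liuxsh9/sft-label | src/sft_label/preprocessing.py | _find_current_request_idx
-- ===== SOURCE A (Python) =====
-- def _find_current_request_idx(conversations, last_assistant_idx):
--     """Return the human turn that the final assistant response is answering."""
--     if last_assistant_idx <= 0:
--         return 0 if conversations else -1
--     for idx in range(last_assistant_idx - 1, -1, -1):
--         if conversations[idx].get("from") == "human":
--             return idx
--     for idx, turn in enumerate(conversations):
--         if turn.get("from") == "human":
--             return idx
--     return max(0, last_assistant_idx - 1)
-- ===== SOURCE B (Python) =====
-- def _find_current_request_idx(conversations, last_assistant_idx):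
--     """Return the human turn that the final assistant response is answering."""
--     if last_assistant_idx <= 0:
--         return 0 if conversations else -1
--     best_before = None   # last human index strictly below last_assistant_idx
--     first_human = None   # first human index anywhere
--     for i, turn in enumerate(conversations):
--         if turn.get("from") == "human":
--             if first_human is None:
--                 first_human = i
--             if i < last_assistant_idx:
--                 best_before = i
--     if best_before is not None:
--         return best_before
--     if first_human is not None:
--         return first_human
--     return last_assistant_idx - 1
-- ===== Notes on version B (the rewrite author's own statement) =====
-- stated objective: alternative
-- what changed: Replaces A's two directional early-exit scans (a backward indexed scan, then a forward enumerate scan) with a single forward fold over the conversation that maintains two accumulators (last human index below the bound, first human index anywhere) and selects from them at the end.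
import Mathlib
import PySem

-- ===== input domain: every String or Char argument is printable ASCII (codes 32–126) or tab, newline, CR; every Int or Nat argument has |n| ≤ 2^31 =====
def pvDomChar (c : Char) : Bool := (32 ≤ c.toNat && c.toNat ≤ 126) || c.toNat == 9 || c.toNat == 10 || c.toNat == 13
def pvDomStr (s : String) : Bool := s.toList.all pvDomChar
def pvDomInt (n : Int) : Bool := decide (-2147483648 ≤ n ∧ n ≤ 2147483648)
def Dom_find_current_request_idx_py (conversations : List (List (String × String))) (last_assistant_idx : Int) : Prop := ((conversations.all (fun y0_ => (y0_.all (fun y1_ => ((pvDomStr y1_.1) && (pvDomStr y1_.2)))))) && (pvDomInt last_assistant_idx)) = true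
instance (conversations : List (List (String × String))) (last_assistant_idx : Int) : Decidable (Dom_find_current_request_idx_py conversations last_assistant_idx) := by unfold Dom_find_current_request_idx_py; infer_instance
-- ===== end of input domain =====

-- B replaces A's two directional early-exit scans with one forward fold keeping two
-- accumulators (last human below the bound, first human anywhere); objective: alternative.

-- turn.get("from") == "human"
def pvIsHuman (t : List (String × String)) : Bool :=
  PySem.Dict.get? (PySem.Dict.mk t) "from" == some "human"

-- ===== PORT A =====
-- the backward scan: for idx in range(last_assistant_idx-1, -1, -1)
def pvABack (cs : List (List (String × String))) : List Int → Option Int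
  | [] => none
  | i :: rest =>
    match PySem.List.pyGet? cs i with
    | none => some 0  -- IndexError in Python; these inputs are excluded by Pre_
    | some t => if pvIsHuman t then some i else pvABack cs rest

-- the forward scan: for idx, turn in enumerate(conversations)
def pvAFwd : List (Int × List (String × String)) → Option Int
  | [] => none
  | (i, t) :: rest => if pvIsHuman t then some i else pvAFwd rest

def find_current_request_idx_py (conversations : List (List (String × String))) (last_assistant_idx : Int) : Int :=
  if last_assistant_idx ≤ 0 then
    (if conversations.isEmpty then -1 else 0)
  else
    match pvABack conversations (PySem.List.pyRange (last_assistant_idx - 1) (-1) (-1)) with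
    | some i => i
    | none =>
      match pvAFwd (PySem.List.enumerate conversations 0) with
      | some i => i
      | none => max 0 (last_assistant_idx - 1)

-- ===== PORT B =====
-- one step of B's single forward pass: update (best_before, first_human)
def pvBStep (k : Int) (st : Option Int × Option Int) (p : Int × List (String × String)) : Option Int × Option Int :=
  if pvIsHuman p.2 then
    ((if p.1 < k then some p.1 else st.1),
     (match st.2 with | some _ => st.2 | none => some p.1))
  else st

def find_current_request_idx_py_alt (conversations : List (List (String × String))) (last_assistant_idx : Int) : Int :=
  if last_assistant_idx ≤ 0 then
    (if conversations.isEmpty then -1 else 0)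
  else
    let st := (PySem.List.enumerate conversations 0).foldl (pvBStep last_assistant_idx) (none, none)
    match st.1 with
    | some i => i
    | none =>
      match st.2 with
      | some i => i
      | none => last_assistant_idx - 1

-- ===== PRECONDITION & SPEC =====
-- Pre_ excludes exactly the inputs where A's backward scan indexes past the end and raises IndexError.
def Pre_find_current_request_idx_py (conversations : List (List (String × String))) (last_assistant_idx : Int) : Prop :=
  last_assistant_idx ≤ 0 ∨ last_assistant_idx ≤ (conversations.length : Int)
instance (conversations : List (List (String × String))) (last_assistant_idx : Int) : Decidable (Pre_find_current_request_idx_py conversations last_assistant_idx) := by unfold Pre_find_current_request_idx_py; infer_instance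

def pvWitness_find_current_request_idx_py : (List (List (String × String))) × Int :=
  ([[("from", "human")], [("from", "gpt")]], 1)

def Spec_find_current_request_idx_py (conversations : List (List (String × String))) (last_assistant_idx : Int) (out : Int) : Prop := out = find_current_request_idx_py_alt conversations last_assistant_idx
instance (conversations : List (List (String × String))) (last_assistant_idx : Int) (out : Int) : Decidable (Spec_find_current_request_idx_py conversations last_assistant_idx out) := by unfold Spec_find_current_request_idx_py; infer_instance

-- ===== CLAIM (what is proved, stated in full; the proofs are below) =====
def Claim_equal_find_current_request_idx_py : Prop := ∀ (conversations : List (List (String × String))) (last_assistant_idx : Int), Dom_find_current_request_idx_py conversations last_assistant_idx → Pre_find_current_request_idx_py conversations last_assistant_idx → Spec_find_current_request_idx_py conversations last_assistant_idx (find_current_request_idx_py conversations last_assistant_idx)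

-- ===== LEMMAS AND PROOFS =====

-- abbreviation used only in the proofs: is index j a human turn
def pvG (cs : List (List (String × String))) (j : Int) : Bool :=
  pvIsHuman (PySem.List.pyGetD cs j [])

-- getLast? of a cons, in match-friendly form
lemma pvConsGetLast {α : Type} (a : α) (L : List α) :
    (a :: L).getLast? = some (L.getLast?.getD a) := by
  cases L with
  | nil => rfl
  | cons b L' =>
    rw [List.getLast?_cons_cons]
    cases h : (b :: L').getLast? with
    | none => simp at h
    | some y => rfl

-- characterization of B's fold, both components, for any initial state
lemma fold_char (k : Int) (l : List (Int × List (String × String))) (b f : Option Int) :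
    l.foldl (pvBStep k) (b, f)
      = ((match ((l.filter (fun p => pvIsHuman p.2 && decide (p.1 < k))).map Prod.fst).getLast? with
          | some i => some i | none => b),
         (match f with
          | some _ => f
          | none => ((l.filter (fun p => pvIsHuman p.2)).map Prod.fst).head?)) := by
  induction l generalizing b f with
  | nil => cases f <;> rfl
  | cons p rest ih =>
    simp only [List.foldl_cons, pvBStep, List.filter_cons]
    by_cases hh : pvIsHuman p.2
    · by_cases hk : p.1 < k
      · simp only [hh, hk, decide_true, Bool.true_and, if_pos, List.map_cons, ih, pvConsGetLast]
        cases hgl : ((rest.filter (fun p => pvIsHuman p.2 && decide (p.1 < k))).map Prod.fst).getLast? with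
        | none => cases f <;> simp
        | some x => cases f <;> simp
      · simp only [hh, hk, decide_false, Bool.and_false, if_pos, ih]
        cases f <;> simp
    · simp [hh, ih]

-- forward scan = head? of the filtered enumeration
lemma fwd_eq (l : List (Int × List (String × String))) :
    pvAFwd l = ((l.filter (fun p => pvIsHuman p.2)).map Prod.fst).head? := by
  induction l with
  | nil => rfl
  | cons p rest ih =>
    obtain ⟨i, t⟩ := p
    simp only [pvAFwd, List.filter_cons]
    by_cases h : pvIsHuman t <;> simp [h, ih]

-- backward scan = getLast? of the filtered initial segment
lemma back_eq (cs : List (List (String × String))) (m : Nat) (hm : m ≤ cs.length) :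
    pvABack cs (PySem.List.pyRange ((m : Int) - 1) (-1) (-1))
      = ((PySem.List.pyRange 0 (m : Int) 1).filter (pvG cs)).getLast? := by
  induction m with
  | zero => simp [PySem.List.pyRange_neg_one_eq_nil, PySem.List.pyRange_one_eq_nil, pvABack]
  | succ n ih =>
    have hn : n < cs.length := hm
    have h1 : PySem.List.pyRange ((↑(n + 1) : Int) - 1) (-1) (-1)
        = (n : Int) :: PySem.List.pyRange ((n : Int) - 1) (-1) (-1) := by
      push_cast
      rw [show (n : Int) + 1 - 1 = (n : Int) by ring]
      exact PySem.List.pyRange_neg_one_cons (by omega)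
    have h2 : PySem.List.pyRange 0 ((↑(n + 1) : Int)) 1
        = PySem.List.pyRange 0 (n : Int) 1 ++ [(n : Int)] := by
      push_cast
      exact PySem.List.pyRange_one_succ_right (by omega)
    have hget : PySem.List.pyGet? cs (n : Int) = some (cs.getD n []) := by
      simp [PySem.List.pyGet?, PySem.List.pyIdx?, hn, List.getD_eq_getElem?_getD]
    have hgetD : PySem.List.pyGetD cs (n : Int) [] = cs.getD n [] := by
      simp [PySem.List.pyGetD, hget]
    rw [h1, h2]
    simp only [pvABack, hget, List.filter_append, List.getLast?_append, List.filter_cons, List.filter_nil, ih (by omega)]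
    have hg : pvG cs (n : Int) = pvIsHuman (cs.getD n []) := by simp [pvG, hgetD]
    by_cases h : pvIsHuman (cs.getD n []) <;>
      simp [hg, List.getD_eq_getElem?_getD] <;>
      simp [← List.getD_eq_getElem?_getD, h]

-- B's filtered-and-bounded enumeration, as a filtered range of positions
lemma enumBound_eq (cs : List (List (String × String))) (k : Int) :
    (((PySem.List.enumerate cs 0).filter (fun p => pvIsHuman p.2 && decide (p.1 < k))).map Prod.fst)
      = (PySem.List.pyRange 0 (cs.length : Int) 1).filter (fun j => pvG cs j && decide (j < k)) := by
  rw [PySem.List.enumerate_eq_map_pyRange cs []]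
  rw [List.filter_map, List.map_map]
  simp only [Function.comp_def, List.map_id', PySem.List.len_eq]
  rfl

-- B's unbounded filtered enumeration, likewise
lemma enum_eq (cs : List (List (String × String))) :
    (((PySem.List.enumerate cs 0).filter (fun p => pvIsHuman p.2)).map Prod.fst)
      = (PySem.List.pyRange 0 (cs.length : Int) 1).filter (pvG cs) := by
  rw [PySem.List.enumerate_eq_map_pyRange cs []]
  rw [List.filter_map, List.map_map]
  simp only [Function.comp_def, List.map_id', PySem.List.len_eq]
  rfl

-- the bounded filtered range equals the filtered initial segment up to k
lemma bound_eq (cs : List (List (String × String))) (k : Int) (h0 : 0 ≤ k) (hk : k ≤ (cs.length : Int)) :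
    (PySem.List.pyRange 0 (cs.length : Int) 1).filter (fun j => pvG cs j && decide (j < k))
      = (PySem.List.pyRange 0 k 1).filter (pvG cs) := by
  have : (PySem.List.pyRange 0 (cs.length : Int) 1).filter (fun j => pvG cs j && decide (j < k))
      = ((PySem.List.pyRange 0 (cs.length : Int) 1).filter (fun j => decide (j < k))).filter (pvG cs) := by
    rw [List.filter_filter]
  rw [this]
  congr 1
  rw [PySem.List.pyRange_one_append 0 k (cs.length : Int) h0 hk, List.filter_append]
  have ha : (PySem.List.pyRange 0 k 1).filter (fun i => decide (i < k)) = PySem.List.pyRange 0 k 1 := by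
    apply List.filter_eq_self.mpr
    intro a ha
    have := (PySem.List.mem_pyRange_one).mp ha
    simp; omega
  have hb : (PySem.List.pyRange k (cs.length : Int) 1).filter (fun i => decide (i < k)) = [] := by
    apply List.filter_eq_nil_iff.mpr
    intro a ha
    have := (PySem.List.mem_pyRange_one).mp ha
    simp; omega
  rw [ha, hb, List.append_nil]

-- ===== VERDICT (by name: the statement is the Claim_ definition above) =====
theorem find_current_request_idx_py_spec : Claim_equal_find_current_request_idx_py := by
  intro cs k _ hpre
  unfold Spec_find_current_request_idx_py find_current_request_idx_py find_current_request_idx_py_alt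
  by_cases hk : k ≤ 0
  · simp [hk]
  · have hk' : 0 < k := by omega
    have hlen : k ≤ (cs.length : Int) := by
      rcases hpre with h | h
      · omega
      · exact h
    simp only [if_neg hk]
    rw [fold_char]
    simp only [enumBound_eq, enum_eq, bound_eq cs k (by omega) hlen]
    have hmk : ((k.toNat : Int)) = k := by omega
    have hback : pvABack cs (PySem.List.pyRange (k - 1) (-1) (-1))
        = ((PySem.List.pyRange 0 k 1).filter (pvG cs)).getLast? := by
      rw [← hmk]
      exact back_eq cs k.toNat (by omega)
    rw [hback, fwd_eq, enum_eq]
    cases hb : ((PySem.List.pyRange 0 k 1).filter (pvG cs)).getLast? with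
    | some i => simp
    | none =>
      cases hh : ((PySem.List.pyRange 0 (cs.length : Int) 1).filter (pvG cs)).head? with
      | some i => simp
      | none => simp; omega
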